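-- pv_equiv track=rewrite | github.com/pestrstr/421bot | chatbot.py | summarize_analysis
-- ===== SOURCE A (Python) =====
-- def summarize_analysis(num_words, wps, num_pronouns, num_prp, num_articles, num_past, num_future, num_prep, num_negations):
--     informative_correlates = []
--
--     # Creating a reference dictionary with keys = linguistic features, and values = psychological correlates.
--     # informative_correlates should hold a subset of three values from this dictionary.
--     # DO NOT change these values for autograder to work correctly
--     psychological_correlates = {}
--     psychological_correlates["num_words"] = "Talkativeness, verbal fluency"
--     psychological_correlates["wps"] = "Verbal fluency, cognitive complexity"
--     psychological_correlates["num_pronouns"] = "Informal, personal"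
--     psychological_correlates["num_prp"] = "Personal, social"
--     psychological_correlates["num_articles"] = "Use of concrete nouns, interest in objects/things"
--     psychological_correlates["num_past"] = "Focused on the past"
--     psychological_correlates["num_future"] = "Future and goal-oriented"
--     psychological_correlates["num_prep"] = "Education, concern with precision"
--     psychological_correlates["num_negations"] = "Inhibition"
--
--     # Set thresholds
--     num_words_threshold = 100
--     wps_threshold = 20
--
--     if num_words > num_words_threshold:
--         informative_correlates.append(psychological_correlates["num_words"])
--     if wps > wps_threshold:
--         informative_correlates.append(psychological_correlates["wps"])
--
--     # Ordering remaining linguistic features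
--     feature_dict = {
--         "num_pronouns": num_pronouns,
--         "num_prp": num_prp,
--         "num_articles": num_articles,
--         "num_past": num_past,
--         "num_future": num_future,
--         "num_prep": num_prep,
--         "num_negations": num_negations
--     }
--
--     tie_breaker = dict(enumerate(feature_dict.keys()))
--     tie_breaker = dict((y, x) for x,y in tie_breaker.items())
--     feature_dict_sorted = dict(sorted(feature_dict.items(), key=lambda item: (-item[1], tie_breaker[item[0]])))
--
--     for feature_item in feature_dict_sorted.items():
--         feature_name, _ = feature_item
--         if len(informative_correlates) < 3:
--             informative_correlates.append(psychological_correlates[feature_name])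
--         else:
--             break
--
--     return informative_correlates
-- ===== SOURCE B (Python) =====
-- def summarize_analysis(num_words, wps, num_pronouns, num_prp, num_articles, num_past, num_future, num_prep, num_negations):
--     informative_correlates = []
--     if num_words > 100:
--         informative_correlates.append("Talkativeness, verbal fluency")
--     if wps > 20:
--         informative_correlates.append("Verbal fluency, cognitive complexity")
--
--     remaining = [
--         ("Informal, personal", num_pronouns),
--         ("Personal, social", num_prp),
--         ("Use of concrete nouns, interest in objects/things", num_articles),
--         ("Focused on the past", num_past),
--         ("Future and goal-oriented", num_future),
--         ("Education, concern with precision", num_prep),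
--         ("Inhibition", num_negations),
--     ]
--     # repeated first-max selection (max returns the FIRST maximal item, matching
--     # A's (-value, insertion-index) tie-break) instead of a full sort
--     while len(informative_correlates) < 3:
--         best = max(remaining, key=lambda item: item[1])
--         informative_correlates.append(best[0])
--         remaining.remove(best)
--     return informative_correlates
-- ===== Notes on version B (the rewrite author's own statement) =====
-- stated objective: simpler
-- what changed: B drops A's correlate/tie-breaker dictionaries and full (-value, index) tuple sort, instead repeatedly taking the first maximal pair (max + remove) from a plain list of (correlate, value) pairs until three correlates are collected.
import Mathlib
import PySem

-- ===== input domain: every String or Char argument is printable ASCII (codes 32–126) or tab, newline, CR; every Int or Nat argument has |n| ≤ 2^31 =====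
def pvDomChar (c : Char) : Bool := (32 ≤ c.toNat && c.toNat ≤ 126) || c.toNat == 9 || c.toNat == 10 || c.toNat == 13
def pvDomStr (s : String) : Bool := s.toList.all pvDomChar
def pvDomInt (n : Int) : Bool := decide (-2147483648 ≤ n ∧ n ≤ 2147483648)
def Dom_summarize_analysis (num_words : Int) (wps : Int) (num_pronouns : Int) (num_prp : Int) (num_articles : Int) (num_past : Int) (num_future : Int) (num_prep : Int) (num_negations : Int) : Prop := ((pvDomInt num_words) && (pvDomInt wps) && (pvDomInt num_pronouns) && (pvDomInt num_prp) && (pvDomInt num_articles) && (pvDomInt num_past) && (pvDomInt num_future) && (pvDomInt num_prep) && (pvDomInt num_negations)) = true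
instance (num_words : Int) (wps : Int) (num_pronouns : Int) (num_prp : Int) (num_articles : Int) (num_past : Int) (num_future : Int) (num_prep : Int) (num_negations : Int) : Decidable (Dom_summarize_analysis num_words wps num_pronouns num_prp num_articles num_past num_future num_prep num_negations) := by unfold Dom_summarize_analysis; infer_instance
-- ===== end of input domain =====

-- B replaces A's tie-breaker dicts and full sort by a repeated first-max selection over a plain
-- list of (correlate, value) pairs — simpler, no asymptotic change (the list has a fixed 7 entries).

-- ===== PORT A =====
-- A's final 'for … if len < 3 … else break' loop over the sorted items, looking each
-- feature name up in psychological_correlates.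
def summarize_analysis_loop (pc : PySem.Dict String String) : List (String × Int) → List String → List String
  | [], acc => acc
  | (name, _) :: rest, acc =>
    if acc.length < 3 then summarize_analysis_loop pc rest (acc ++ [PySem.Dict.getD pc name ""])
    else acc

def summarize_analysis (num_words : Int) (wps : Int) (num_pronouns : Int) (num_prp : Int) (num_articles : Int) (num_past : Int) (num_future : Int) (num_prep : Int) (num_negations : Int) : List String :=
  let informative_correlates : List String := []
  let psychological_correlates : PySem.Dict String String :=
    ((((((((PySem.Dict.empty.insert "num_words" "Talkativeness, verbal fluency").insert
      "wps" "Verbal fluency, cognitive complexity").insert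
      "num_pronouns" "Informal, personal").insert
      "num_prp" "Personal, social").insert
      "num_articles" "Use of concrete nouns, interest in objects/things").insert
      "num_past" "Focused on the past").insert
      "num_future" "Future and goal-oriented").insert
      "num_prep" "Education, concern with precision").insert
      "num_negations" "Inhibition"
  let num_words_threshold : Int := 100
  let wps_threshold : Int := 20
  -- the keys looked up below are always present, so getD with a dummy default is exact
  let ic1 : List String :=
    if num_words > num_words_threshold then informative_correlates ++ [PySem.Dict.getD psychological_correlates "num_words" ""]
    else informative_correlates
  let ic2 : List String :=
    if wps > wps_threshold then ic1 ++ [PySem.Dict.getD psychological_correlates "wps" ""]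
    else ic1
  let feature_dict : PySem.Dict String Int :=
    ((((((PySem.Dict.empty.insert "num_pronouns" num_pronouns).insert
      "num_prp" num_prp).insert
      "num_articles" num_articles).insert
      "num_past" num_past).insert
      "num_future" num_future).insert
      "num_prep" num_prep).insert
      "num_negations" num_negations
  let tie0 : PySem.Dict Int String := PySem.Dict.ofList (PySem.List.enumerate feature_dict.keys)
  let tie_breaker : PySem.Dict String Int := PySem.Dict.ofList (tie0.items.map (fun p => (p.2, p.1)))
  -- dict(sorted(feature_dict.items(), key=…)): keys are distinct, so the dict built from the
  -- sorted items and then iterated with .items() is exactly the sorted list itself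
  let feature_dict_sorted : List (String × Int) :=
    PySem.List.sorted2 feature_dict.items (fun item => -item.2) (fun item => PySem.Dict.getD tie_breaker item.1 0)
  summarize_analysis_loop psychological_correlates feature_dict_sorted ic2

-- ===== PORT B =====
-- B's 'while len(...) < 3' loop: fuel = number of appends still to make; max(remaining, key=item[1])
-- is PySem.List.max? (first maximal item), remaining.remove(best) is PySem.List.remove?.
-- remaining is never empty here, so the none branches are unreachable.
def pick_loop : Nat → List (String × Int) → List String → List String
  | 0, _, acc => acc
  | k + 1, remaining, acc =>
    match PySem.List.max? remaining (fun item => item.2) with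
    | none => acc
    | some best =>
      match PySem.List.remove? remaining best with
      | none => acc
      | some remaining' => pick_loop k remaining' (acc ++ [best.1])

def summarize_analysis_alt (num_words : Int) (wps : Int) (num_pronouns : Int) (num_prp : Int) (num_articles : Int) (num_past : Int) (num_future : Int) (num_prep : Int) (num_negations : Int) : List String :=
  let ic0 : List String := []
  let ic1 : List String := if num_words > 100 then ic0 ++ ["Talkativeness, verbal fluency"] else ic0
  let ic2 : List String := if wps > 20 then ic1 ++ ["Verbal fluency, cognitive complexity"] else ic1
  let remaining : List (String × Int) :=
    [("Informal, personal", num_pronouns),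
     ("Personal, social", num_prp),
     ("Use of concrete nouns, interest in objects/things", num_articles),
     ("Focused on the past", num_past),
     ("Future and goal-oriented", num_future),
     ("Education, concern with precision", num_prep),
     ("Inhibition", num_negations)]
  pick_loop (3 - ic2.length) remaining ic2

-- ===== PRECONDITION & SPEC =====
def Spec_summarize_analysis (num_words : Int) (wps : Int) (num_pronouns : Int) (num_prp : Int) (num_articles : Int) (num_past : Int) (num_future : Int) (num_prep : Int) (num_negations : Int) (out : List String) : Prop := out = summarize_analysis_alt num_words wps num_pronouns num_prp num_articles num_past num_future num_prep num_negations
instance (num_words : Int) (wps : Int) (num_pronouns : Int) (num_prp : Int) (num_articles : Int) (num_past : Int) (num_future : Int) (num_prep : Int) (num_negations : Int) (out : List String) : Decidable (Spec_summarize_analysis num_words wps num_pronouns num_prp num_articles num_past num_future num_prep num_negations out) := by unfold Spec_summarize_analysis; infer_instance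

-- ===== CLAIM (what is proved, stated in full; the proofs are below) =====
def Claim_equal_summarize_analysis : Prop := ∀ (num_words : Int) (wps : Int) (num_pronouns : Int) (num_prp : Int) (num_articles : Int) (num_past : Int) (num_future : Int) (num_prep : Int) (num_negations : Int), Dom_summarize_analysis num_words wps num_pronouns num_prp num_articles num_past num_future num_prep num_negations → Spec_summarize_analysis num_words wps num_pronouns num_prp num_articles num_past num_future num_prep num_negations (summarize_analysis num_words wps num_pronouns num_prp num_articles num_past num_future num_prep num_negations)

-- ===== LEMMAS AND PROOFS =====

def selSeq : List (String × Int) → List (String × Int)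
  | [] => []
  | x :: xs =>
    match h : PySem.List.max? (x :: xs) (fun item => item.2) with
    | none => []
    | some m => m :: selSeq ((x :: xs).erase m)
termination_by xs => xs.length
decreasing_by
  have hm : m ∈ x :: xs := PySem.List.max?_mem h
  have := List.length_erase_of_mem hm
  simp [this]

lemma selSeq_cons (x : String × Int) (xs : List (String × Int)) (m : String × Int)
    (hm : PySem.List.max? (x :: xs) (fun item => item.2) = some m) :
    selSeq (x :: xs) = m :: selSeq ((x :: xs).erase m) := by
  rw [selSeq]
  split <;> simp_all

lemma selSeq_perm : ∀ (n : Nat) (xs : List (String × Int)), xs.length ≤ n → (selSeq xs).Perm xs := by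
  intro n
  induction n with
  | zero => intro xs h; rw [List.length_eq_zero_iff.mp (Nat.le_zero.mp h)]; simp [selSeq]
  | succ n ih =>
    intro xs h
    match xs with
    | [] => simp [selSeq]
    | x :: xs =>
      cases hm : PySem.List.max? (x :: xs) (fun item => item.2) with
      | none => simp [PySem.List.max?_eq_none_iff] at hm
      | some m =>
        have hmem : m ∈ x :: xs := PySem.List.max?_mem hm
        rw [selSeq_cons x xs m hm]
        have hlen : ((x :: xs).erase m).length ≤ n := by
          rw [List.length_erase_of_mem hmem]
          simp only [List.length_cons] at h ⊢; omega
        exact ((ih _ hlen).cons m).trans (List.perm_cons_erase hmem).symm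

def tieD : PySem.Dict String Int :=
  PySem.Dict.mk [("num_pronouns", 0), ("num_prp", 1), ("num_articles", 2), ("num_past", 3),
                 ("num_future", 4), ("num_prep", 5), ("num_negations", 6)]

def tauF (s : String) : Int := PySem.Dict.getD tieD s 0

def keyF (p : String × Int) : Int := (-p.2) * 8 + tauF p.1

lemma tauF_bound (s : String) : 0 ≤ tauF s ∧ tauF s < 8 := by
  unfold tauF tieD PySem.Dict.getD
  simp only [PySem.Dict.get?_mk_cons]
  repeat' split
  all_goals (first | decide | simp [PySem.Dict.get?])

lemma max?_step (b x : String × Int) (rest : List (String × Int)) :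
    PySem.List.max? (b :: x :: rest) (fun item => item.2) =
    PySem.List.max? ((if b.2 < x.2 then x else b) :: rest) (fun item => item.2) := by
  simp only [PySem.List.max?, List.foldl_cons]
  by_cases hbx : b.2 < x.2 <;> simp [hbx]

lemma max?_go : ∀ (xs : List (String × Int)) (b m : String × Int),
    PySem.List.max? (b :: xs) (fun item => item.2) = some m →
    (m = b ∧ ∀ y ∈ xs, y.2 ≤ b.2) ∨
    (∃ pre suf, xs = pre ++ m :: suf ∧ b.2 < m.2 ∧ (∀ y ∈ pre, y.2 < m.2) ∧ (∀ y ∈ suf, y.2 ≤ m.2)) := by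
  intro xs
  induction xs with
  | nil => intro b m h; simp [PySem.List.max?] at h; exact Or.inl ⟨h.symm, by simp⟩
  | cons x rest ih =>
    intro b m h
    rw [max?_step] at h
    by_cases hbx : b.2 < x.2
    · rw [if_pos hbx] at h
      rcases ih x m h with ⟨rfl, hall⟩ | ⟨pre, suf, rfl, hxm, hpre, hsuf⟩
      · exact Or.inr ⟨[], rest, rfl, hbx, by simp, hall⟩
      · exact Or.inr ⟨x :: pre, suf, rfl, lt_trans hbx hxm,
          by intro y hy; rcases List.mem_cons.mp hy with rfl | hy; exact hxm; exact hpre y hy, hsuf⟩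
    · rw [if_neg hbx] at h
      rcases ih b m h with ⟨rfl, hall⟩ | ⟨pre, suf, rfl, hbm, hpre, hsuf⟩
      · refine Or.inl ⟨rfl, ?_⟩
        intro y hy; rcases List.mem_cons.mp hy with rfl | hy
        · omega
        · exact hall y hy
      · refine Or.inr ⟨x :: pre, suf, rfl, hbm, ?_, hsuf⟩
        intro y hy; rcases List.mem_cons.mp hy with rfl | hy
        · omega
        · exact hpre y hy

lemma max?_first (xs : List (String × Int)) (m : String × Int)
    (h : PySem.List.max? xs (fun item => item.2) = some m) :
    ∃ pre suf, xs = pre ++ m :: suf ∧ (∀ y ∈ pre, y.2 < m.2) ∧ (∀ y ∈ suf, y.2 ≤ m.2) := by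
  match xs with
  | [] => simp [PySem.List.max?] at h
  | x :: rest =>
    rcases max?_go rest x m h with ⟨rfl, hall⟩ | ⟨pre, suf, rfl, hxm, hpre, hsuf⟩
    · exact ⟨[], rest, rfl, by simp, hall⟩
    · refine ⟨x :: pre, suf, rfl, ?_, hsuf⟩
      intro y hy; rcases List.mem_cons.mp hy with rfl | hy
      · exact hxm
      · exact hpre y hy

lemma selSeq_pairwise : ∀ (n : Nat) (xs : List (String × Int)), xs.length ≤ n →
    xs.Pairwise (fun p q => tauF p.1 < tauF q.1) →
    (selSeq xs).Pairwise (fun p q => keyF p < keyF q) := by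
  intro n
  induction n with
  | zero => intro xs h _; rw [List.length_eq_zero_iff.mp (Nat.le_zero.mp h)]; simp [selSeq]
  | succ n ih =>
    intro xs hlen hp
    match xs with
    | [] => simp [selSeq]
    | x :: xs =>
      cases hm : PySem.List.max? (x :: xs) (fun item => item.2) with
      | none => simp [PySem.List.max?_eq_none_iff] at hm
      | some m =>
        obtain ⟨pre, suf, heq, hpre, hsuf⟩ := max?_first _ _ hm
        have hmem : m ∈ x :: xs := PySem.List.max?_mem hm
        have hnm : m ∉ pre := fun hy => absurd (hpre m hy) (lt_irrefl _)
        have herase : (x :: xs).erase m = pre ++ suf := by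
          rw [heq, List.erase_append_right _ hnm, List.erase_cons_head]
        have hp' : (pre ++ m :: suf).Pairwise (fun p q => tauF p.1 < tauF q.1) := heq ▸ hp
        have hpsuf : ∀ z ∈ suf, tauF m.1 < tauF z.1 :=
          (List.pairwise_cons.mp (List.pairwise_append.mp hp').2.1).1
        have hps : (pre ++ suf).Pairwise (fun p q => tauF p.1 < tauF q.1) :=
          hp'.sublist ((List.sublist_cons_self m suf).append_left pre)
        have hlen' : (pre ++ suf).length ≤ n := by
          have h1 : (x :: xs).length = (pre ++ m :: suf).length := by rw [heq]
          simp only [List.length_cons, List.length_append] at h1 hlen ⊢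
          omega
        rw [selSeq_cons x xs m hm, herase]
        refine List.Pairwise.cons ?_ (ih _ hlen' hps)
        intro z hz
        have hz' : z ∈ pre ++ suf := (selSeq_perm (pre ++ suf).length _ le_rfl).mem_iff.mp hz
        have hbm := tauF_bound m.1
        have hbz := tauF_bound z.1
        rcases List.mem_append.mp hz' with hzp | hzs
        · have := hpre z hzp; unfold keyF; omega
        · have h1 := hsuf z hzs
          have h2 := hpsuf z hzs
          unfold keyF; omega

lemma before_eq (a b : String × Int) :
    (decide (-a.2 < -b.2) || (!decide (-b.2 < -a.2) && decide (tauF a.1 < tauF b.1))) =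
    decide (keyF a < keyF b) := by
  have h1 := tauF_bound a.1
  have h2 := tauF_bound b.1
  rw [Bool.eq_iff_iff]
  simp only [Bool.or_eq_true, Bool.and_eq_true, Bool.not_eq_eq_eq_not, Bool.not_true,
    decide_eq_true_eq, decide_eq_false_iff_not]
  unfold keyF
  omega

lemma sorted2_eq_sorted_keyF (xs : List (String × Int)) :
    PySem.List.sorted2 xs (fun item => -item.2) (fun item => PySem.Dict.getD tieD item.1 0) =
    PySem.List.sorted xs keyF := by
  have h : (fun a b : String × Int => decide (-a.2 < -b.2) || (!decide (-b.2 < -a.2) && decide (PySem.Dict.getD tieD a.1 0 < PySem.Dict.getD tieD b.1 0))) =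
      (fun a b : String × Int => decide (keyF a < keyF b)) := by
    funext a b; exact before_eq a b
  show List.foldl (fun acc x => PySem.List.insertBy _ x acc) [] xs =
       List.foldl (fun acc x => PySem.List.insertBy _ x acc) [] xs
  rw [h]

lemma loopA_eq_take (pc : PySem.Dict String String) :
    ∀ (s : List (String × Int)) (acc : List String),
      summarize_analysis_loop pc s acc =
        acc ++ (s.map (fun p => PySem.Dict.getD pc p.1 "")).take (3 - acc.length) := by
  intro s
  induction s with
  | nil => intro acc; simp [summarize_analysis_loop]
  | cons p rest ih =>
    intro acc
    obtain ⟨name, v⟩ := p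
    by_cases hl : acc.length < 3
    · rw [show summarize_analysis_loop pc ((name, v) :: rest) acc =
          summarize_analysis_loop pc rest (acc ++ [PySem.Dict.getD pc name ""]) from by
        simp [summarize_analysis_loop, hl]]
      rw [ih]
      have h3 : 3 - acc.length = (3 - (acc ++ [PySem.Dict.getD pc name ""]).length) + 1 := by
        simp; omega
      rw [h3]
      simp
    · have h0 : 3 - acc.length = 0 := by omega
      simp [summarize_analysis_loop, hl, h0]

lemma pick_loop_eq_take : ∀ (k : Nat) (rem : List (String × Int)) (acc : List String),
    k ≤ rem.length →
    pick_loop k rem acc = acc ++ ((selSeq rem).map (fun p => p.1)).take k := by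
  intro k
  induction k with
  | zero => intro rem acc _; simp [pick_loop]
  | succ k ih =>
    intro rem acc hk
    match rem with
    | [] => simp at hk
    | x :: xs =>
      cases hm : PySem.List.max? (x :: xs) (fun item => item.2) with
      | none => simp [PySem.List.max?_eq_none_iff] at hm
      | some m =>
        have hmem : m ∈ x :: xs := PySem.List.max?_mem hm
        have hrm : PySem.List.remove? (x :: xs) m = some ((x :: xs).erase m) :=
          PySem.List.remove?_eq_some_erase _ _ hmem
        have hlen : k ≤ ((x :: xs).erase m).length := by
          rw [List.length_erase_of_mem hmem]
          simp only [List.length_cons] at hk ⊢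
          omega
        rw [show pick_loop (k + 1) (x :: xs) acc =
            pick_loop k ((x :: xs).erase m) (acc ++ [m.1]) from by
          simp [pick_loop, hm, hrm]]
        rw [ih _ _ hlen, selSeq_cons x xs m hm]
        simp

lemma erase_map_of_nodup (f : (String × Int) → (String × Int)) :
    ∀ (xs : List (String × Int)) (m : String × Int), m ∈ xs → (xs.map f).Nodup →
      (xs.map f).erase (f m) = (xs.erase m).map f := by
  intro xs
  induction xs with
  | nil => intro m hm; simp at hm
  | cons x xs ih =>
    intro m hm hnd
    by_cases hx : x = m
    · subst hx
      simp [List.erase_cons_head]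
    · have hmx : m ∈ xs := by
        rcases List.mem_cons.mp hm with h | h
        · exact absurd h.symm hx
        · exact h
      have hfm : f m ∈ xs.map f := List.mem_map_of_mem hmx
      have hnd' := List.nodup_cons.mp (by simpa using hnd : (f x :: xs.map f).Nodup)
      have hne : ¬(f x == f m) = true := by
        simp only [beq_iff_eq]
        intro hcontra
        exact hnd'.1 (hcontra ▸ hfm)
      have hxm : ¬(x == m) = true := by simpa using hx
      rw [List.map_cons, List.erase_cons_tail hne, List.erase_cons_tail hxm,
        ih m hmx hnd'.2, List.map_cons]

lemma max?_map_go (f : (String × Int) → (String × Int)) (hf : ∀ p, (f p).2 = p.2) :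
    ∀ (xs : List (String × Int)) (b : String × Int),
      PySem.List.max? (f b :: xs.map f) (fun item => item.2) =
        (PySem.List.max? (b :: xs) (fun item => item.2)).map f := by
  intro xs
  induction xs with
  | nil => intro b; simp [PySem.List.max?]
  | cons x xs ih =>
    intro b
    rw [List.map_cons, max?_step, max?_step]
    have hif : (if (f b).2 < (f x).2 then f x else f b) = f (if b.2 < x.2 then x else b) := by
      rw [hf, hf, apply_ite f]
    rw [hif, ih]

lemma max?_map (f : (String × Int) → (String × Int)) (hf : ∀ p, (f p).2 = p.2)
    (xs : List (String × Int)) :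
    PySem.List.max? (xs.map f) (fun item => item.2) =
      (PySem.List.max? xs (fun item => item.2)).map f := by
  match xs with
  | [] => simp [PySem.List.max?]
  | x :: xs => rw [List.map_cons, max?_map_go f hf]

lemma selSeq_map (f : (String × Int) → (String × Int)) (hf : ∀ p, (f p).2 = p.2) :
    ∀ (n : Nat) (xs : List (String × Int)), xs.length ≤ n → (xs.map f).Nodup →
      selSeq (xs.map f) = (selSeq xs).map f := by
  intro n
  induction n with
  | zero => intro xs h _; rw [List.length_eq_zero_iff.mp (Nat.le_zero.mp h)]; simp [selSeq]
  | succ n ih =>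
    intro xs hlen hnd
    match xs with
    | [] => simp [selSeq]
    | x :: xs =>
      cases hm : PySem.List.max? (x :: xs) (fun item => item.2) with
      | none => simp [PySem.List.max?_eq_none_iff] at hm
      | some m =>
        have hmem : m ∈ x :: xs := PySem.List.max?_mem hm
        have hmf : PySem.List.max? (f x :: xs.map f) (fun item => item.2) = some (f m) := by
          have := max?_map f hf (x :: xs)
          simpa [hm] using this
        have herase : ((x :: xs).map f).erase (f m) = ((x :: xs).erase m).map f :=
          erase_map_of_nodup f _ m hmem hnd
        have hlen' : ((x :: xs).erase m).length ≤ n := by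
          rw [List.length_erase_of_mem hmem]
          simp only [List.length_cons] at hlen ⊢
          omega
        have hnd' : (((x :: xs).erase m).map f).Nodup := by
          rw [← herase]
          exact List.erase_sublist.nodup (by simpa using hnd)
        rw [List.map_cons, selSeq_cons _ _ _ hmf, selSeq_cons _ _ _ hm]
        rw [show (f x :: xs.map f).erase (f m) = ((x :: xs).map f).erase (f m) from by simp]
        rw [herase, ih _ hlen' hnd', List.map_cons]
def pcLit : PySem.Dict String String :=
  PySem.Dict.mk [("num_words", "Talkativeness, verbal fluency"),
                 ("wps", "Verbal fluency, cognitive complexity"),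
                 ("num_pronouns", "Informal, personal"),
                 ("num_prp", "Personal, social"),
                 ("num_articles", "Use of concrete nouns, interest in objects/things"),
                 ("num_past", "Focused on the past"),
                 ("num_future", "Future and goal-oriented"),
                 ("num_prep", "Education, concern with precision"),
                 ("num_negations", "Inhibition")]

def NLit (v0 v1 v2 v3 v4 v5 v6 : Int) : List (String × Int) :=
  [("num_pronouns", v0), ("num_prp", v1), ("num_articles", v2), ("num_past", v3),
   ("num_future", v4), ("num_prep", v5), ("num_negations", v6)]

def fLit (p : String × Int) : String × Int := (PySem.Dict.getD pcLit p.1 "", p.2)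

def icInit (num_words wps : Int) : List String :=
  if wps > 20 then
    (if num_words > 100 then ["Talkativeness, verbal fluency"] else []) ++ ["Verbal fluency, cognitive complexity"]
  else (if num_words > 100 then ["Talkativeness, verbal fluency"] else [])

set_option maxHeartbeats 2000000 in
theorem main_eq (num_words wps v0 v1 v2 v3 v4 v5 v6 : Int) :
    summarize_analysis num_words wps v0 v1 v2 v3 v4 v5 v6 =
    summarize_analysis_alt num_words wps v0 v1 v2 v3 v4 v5 v6 := by
  have hA : summarize_analysis num_words wps v0 v1 v2 v3 v4 v5 v6 =
      summarize_analysis_loop pcLit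
        (PySem.List.sorted2 (NLit v0 v1 v2 v3 v4 v5 v6) (fun item => -item.2)
          (fun item => PySem.Dict.getD tieD item.1 0))
        (icInit num_words wps) := rfl
  have hB : summarize_analysis_alt num_words wps v0 v1 v2 v3 v4 v5 v6 =
      pick_loop (3 - (icInit num_words wps).length) ((NLit v0 v1 v2 v3 v4 v5 v6).map fLit)
        (icInit num_words wps) := rfl
  rw [hA, hB]
  have hpw : (NLit v0 v1 v2 v3 v4 v5 v6).Pairwise (fun p q => tauF p.1 < tauF q.1) := by
    simp [NLit, List.pairwise_cons]
    decide
  have hC : (NLit v0 v1 v2 v3 v4 v5 v6).map fLit =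
      [("Informal, personal", v0), ("Personal, social", v1),
       ("Use of concrete nouns, interest in objects/things", v2), ("Focused on the past", v3),
       ("Future and goal-oriented", v4), ("Education, concern with precision", v5),
       ("Inhibition", v6)] := rfl
  have hnd : ((NLit v0 v1 v2 v3 v4 v5 v6).map fLit).Nodup := by
    rw [hC]
    simp [List.nodup_cons]
  rw [sorted2_eq_sorted_keyF,
    PySem.List.sorted_eq_of_perm_of_pairwise_lt _ _ keyF (selSeq_perm _ _ le_rfl)
      (selSeq_pairwise (NLit v0 v1 v2 v3 v4 v5 v6).length _ le_rfl hpw),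
    loopA_eq_take,
    pick_loop_eq_take _ _ _ (by simp [NLit]; omega),
    selSeq_map fLit (fun p => rfl) (NLit v0 v1 v2 v3 v4 v5 v6).length _ le_rfl hnd,
    List.map_map]
  rfl

-- ===== VERDICT (by name: the statement is the Claim_ definition above) =====
theorem summarize_analysis_spec : Claim_equal_summarize_analysis := by
  intro num_words wps num_pronouns num_prp num_articles num_past num_future num_prep num_negations _
  unfold Spec_summarize_analysis
  exact main_eq num_words wps num_pronouns num_prp num_articles num_past num_future num_prep num_negations
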